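-- pv_equiv track=rewrite | github.com/Silbye/Python-lessons | lesson4/task5.py | mnog_sum
-- ===== SOURCE A (Python) =====
-- def mnog_sum(mnog1, mnog2, mnog1_len, mnog2_len):
--     bigger = len(mnog2)
--     if len(mnog1) > len(mnog2): bigger = len(mnog1)
--     max_range = max(mnog1_len, mnog2_len)
--     results = [0] * (max_range)
--     for j in range(0, bigger):
--         if len(mnog1) < len(mnog2): mnog1 = [0] + mnog1
--         if len(mnog2) < len(mnog1): mnog2 = [0] + mnog2
--     for index in range(len(mnog1)):
--         results[index] = mnog1[index]
--     for index in range(len(mnog2)):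
--         results[index] += mnog2[index]
--     return results
-- ===== SOURCE B (Python) =====
-- def mnog_sum(mnog1, mnog2, mnog1_len, mnog2_len):
--     # single right-aligned backward summing pass instead of pad-then-two-fill-loops;
--     # the summed values are then copied into the zero buffer of the declared length
--     i, j = len(mnog1), len(mnog2)
--     summed = []
--     for _ in range(max(i, j)):
--         i -= 1
--         j -= 1
--         summed.append((mnog1[i] if i >= 0 else 0) + (mnog2[j] if j >= 0 else 0))
--     summed.reverse()
--     results = [0] * max(mnog1_len, mnog2_len)
--     for index in range(len(summed)):
--         results[index] = summed[index]
--     return results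
-- ===== Notes on version B (the rewrite author's own statement) =====
-- stated objective: simpler
-- what changed: Replaces the prepend-padding loop plus the two per-index fill loops with a single right-aligned backward pass that sums both lists directly, then one copy of the summed values into the zero buffer.
import Mathlib
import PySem

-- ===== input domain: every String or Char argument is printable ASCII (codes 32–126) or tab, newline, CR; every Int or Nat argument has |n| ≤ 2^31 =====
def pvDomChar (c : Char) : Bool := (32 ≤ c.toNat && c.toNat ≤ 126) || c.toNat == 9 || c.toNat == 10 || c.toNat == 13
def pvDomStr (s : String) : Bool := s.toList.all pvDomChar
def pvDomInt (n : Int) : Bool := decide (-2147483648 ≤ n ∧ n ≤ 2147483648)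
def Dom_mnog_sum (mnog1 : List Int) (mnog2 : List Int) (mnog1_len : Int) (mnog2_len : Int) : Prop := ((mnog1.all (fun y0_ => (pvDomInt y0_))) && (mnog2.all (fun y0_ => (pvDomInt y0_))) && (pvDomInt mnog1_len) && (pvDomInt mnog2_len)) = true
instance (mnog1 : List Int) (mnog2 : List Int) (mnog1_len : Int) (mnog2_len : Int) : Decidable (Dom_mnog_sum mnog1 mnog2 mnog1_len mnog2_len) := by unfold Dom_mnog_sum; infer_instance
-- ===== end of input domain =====

-- B replaces A's prepend-padding loop plus two index-fill loops with one right-aligned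
-- backward summing pass, then copies the summed values into the zero buffer (objective: simpler).

-- ===== PORT A =====
-- one iteration of A's padding loop body (the two prepend ifs, second tested after the first updates mnog1)
def mnog_padStep (st : List Int × List Int) : List Int × List Int :=
  let m1 := if st.1.length < st.2.length then 0 :: st.1 else st.1
  let m2 := if st.2.length < m1.length then 0 :: st.2 else st.2
  (m1, m2)

-- literal port of A; the two fill loops use List.set / List.getD: inside Pre_ every written
-- index is in range, exactly where Python's results[index] assignment succeeds
def mnog_sum (mnog1 : List Int) (mnog2 : List Int) (mnog1_len : Int) (mnog2_len : Int) : List Int :=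
  let bigger : Int := if (mnog1.length : Int) > (mnog2.length : Int) then (mnog1.length : Int) else (mnog2.length : Int)
  let max_range : Int := max mnog1_len mnog2_len
  let results : List Int := List.replicate max_range.toNat 0
  let st := (PySem.List.pyRange 0 bigger 1).foldl (fun st _ => mnog_padStep st) (mnog1, mnog2)
  let m1 := st.1
  let m2 := st.2
  let results := (List.range m1.length).foldl (fun r i => r.set i (m1.getD i 0)) results
  let results := (List.range m2.length).foldl (fun r i => r.set i (r.getD i 0 + m2.getD i 0)) results
  results

-- ===== PORT B =====
-- B's counted loop: runs max(i, j) times, i and j count down from the lengths and are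
-- decremented before the read; Python's 'mnog1[i] if i >= 0' is the pre-decrement guard '1 ≤ i'
-- (Nat subtraction saturates exactly where the guard returns 0), appends like Source B
def mnog_altLoop : Nat → Nat → Nat → List Int → List Int → List Int → List Int
  | 0, _, _, _, _, acc => acc
  | fuel + 1, i, j, m1, m2, acc =>
      mnog_altLoop fuel (i - 1) (j - 1) m1 m2
        (acc ++ [(if 1 ≤ i then m1.getD (i - 1) 0 else 0) + (if 1 ≤ j then m2.getD (j - 1) 0 else 0)])

-- like A's fill loop, results[index] = summed[index] is List.set / List.getD: inside Pre_
-- every written index is in range, exactly where Python's assignment succeeds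
def mnog_sum_alt (mnog1 : List Int) (mnog2 : List Int) (mnog1_len : Int) (mnog2_len : Int) : List Int :=
  let summed := (mnog_altLoop (max mnog1.length mnog2.length) mnog1.length mnog2.length mnog1 mnog2 []).reverse
  let results : List Int := List.replicate (max mnog1_len mnog2_len).toNat 0
  (List.range summed.length).foldl (fun r i => r.set i (summed.getD i 0)) results

-- ===== PRECONDITION & SPEC =====
-- Pre_ excludes exactly the inputs where A raises IndexError: the result buffer of length
-- max(mnog1_len, mnog2_len) is shorter than the longer coefficient list being written into it.
def Pre_mnog_sum (mnog1 : List Int) (mnog2 : List Int) (mnog1_len : Int) (mnog2_len : Int) : Prop :=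
  ((max mnog1.length mnog2.length : Nat) : Int) ≤ max (max mnog1_len mnog2_len) 0

instance (mnog1 : List Int) (mnog2 : List Int) (mnog1_len : Int) (mnog2_len : Int) : Decidable (Pre_mnog_sum mnog1 mnog2 mnog1_len mnog2_len) := by unfold Pre_mnog_sum; infer_instance

def pvWitness_mnog_sum : List Int × List Int × Int × Int := ([1, 2], [3], 2, 3)

def Spec_mnog_sum (mnog1 : List Int) (mnog2 : List Int) (mnog1_len : Int) (mnog2_len : Int) (out : List Int) : Prop := out = mnog_sum_alt mnog1 mnog2 mnog1_len mnog2_len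
instance (mnog1 : List Int) (mnog2 : List Int) (mnog1_len : Int) (mnog2_len : Int) (out : List Int) : Decidable (Spec_mnog_sum mnog1 mnog2 mnog1_len mnog2_len out) := by unfold Spec_mnog_sum; infer_instance

-- ===== CLAIM (what is proved, stated in full; the proofs are below) =====
def Claim_equal_mnog_sum : Prop := ∀ (mnog1 : List Int) (mnog2 : List Int) (mnog1_len : Int) (mnog2_len : Int), Dom_mnog_sum mnog1 mnog2 mnog1_len mnog2_len → Pre_mnog_sum mnog1 mnog2 mnog1_len mnog2_len → Spec_mnog_sum mnog1 mnog2 mnog1_len mnog2_len (mnog_sum mnog1 mnog2 mnog1_len mnog2_len)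

-- ===== LEMMAS AND PROOFS =====

-- zero-pad a list on the left to length b
def mnog_pad (b : Nat) (l : List Int) : List Int := List.replicate (b - l.length) 0 ++ l

-- the right-aligned sum sequence (top index first), proof mirror of mnog_altLoop's appends
def mnog_rsum (m1 m2 : List Int) (i j : Nat) : List Int :=
  if i = 0 ∧ j = 0 then []
  else ((if 1 ≤ i then m1.getD (i - 1) 0 else 0) + (if 1 ≤ j then m2.getD (j - 1) 0 else 0))
    :: mnog_rsum m1 m2 (i - 1) (j - 1)
termination_by i + j
decreasing_by omega

lemma mnog_foldl_const {α β : Type} (l : List α) (f : β → β) (init : β) :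
    l.foldl (fun st _ => f st) init = f^[l.length] init := by
  induction l generalizing init with
  | nil => rfl
  | cons a t ih => simp [List.foldl, ih, Function.iterate_succ_apply]

lemma mnog_pad_cons (b : Nat) (l : List Int) (h : l.length < b) :
    List.replicate (b - (l.length + 1)) 0 ++ 0 :: l = mnog_pad b l := by
  unfold mnog_pad
  have : b - l.length = (b - (l.length + 1)) + 1 := by omega
  rw [this, List.replicate_succ', List.append_assoc]
  simp

lemma mnog_iterate_pad (k : Nat) : ∀ (x y : List Int),
    max x.length y.length ≤ min x.length y.length + k →
    mnog_padStep^[k] (x, y) = (mnog_pad (max x.length y.length) x, mnog_pad (max x.length y.length) y) := by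
  induction k with
  | zero =>
    intro x y h
    have hxy : x.length = y.length := by omega
    simp [mnog_pad, hxy]
  | succ k ih =>
    intro x y h
    rw [Function.iterate_succ_apply]
    rcases Nat.lt_trichotomy x.length y.length with hlt | heq | hgt
    · have hstep : mnog_padStep (x, y) = (0 :: x, y) := by
        simp [mnog_padStep, hlt]
      rw [hstep, ih (0 :: x) y (by simp; omega)]
      have hm : max (0 :: x).length y.length = max x.length y.length := by simp; omega
      rw [hm]
      have h1 : mnog_pad (max x.length y.length) (0 :: x) = mnog_pad (max x.length y.length) x := by
        conv_lhs => unfold mnog_pad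
        simp only [List.length_cons]
        exact mnog_pad_cons _ x (by omega)
      rw [h1]
    · have hstep : mnog_padStep (x, y) = (x, y) := by
        simp [mnog_padStep, heq]
      rw [hstep, ih x y (by omega)]
    · have hstep : mnog_padStep (x, y) = (x, 0 :: y) := by
        simp [mnog_padStep, hgt, Nat.lt_asymm hgt]
      rw [hstep, ih x (0 :: y) (by simp; omega)]
      have hm : max x.length (0 :: y).length = max x.length y.length := by simp; omega
      rw [hm]
      have h2 : mnog_pad (max x.length y.length) (0 :: y) = mnog_pad (max x.length y.length) y := by
        conv_lhs => unfold mnog_pad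
        simp only [List.length_cons]
        exact mnog_pad_cons _ y (by omega)
      rw [h2]

lemma mnog_fill1 (l : List Int) : ∀ (n : Nat) (r : List Int), n ≤ l.length → n ≤ r.length →
    (List.range n).foldl (fun r i => r.set i (l.getD i 0)) r = l.take n ++ r.drop n := by
  intro n
  induction n with
  | zero => intro r _ _; simp
  | succ n ih =>
    intro r hl hr
    rw [List.range_succ, List.foldl_append, ih r (by omega) (by omega)]
    simp only [List.foldl_cons, List.foldl_nil]
    have hlen : (l.take n).length = n := by simp; omega
    have hset : (l.take n ++ r.drop n).set n (l.getD n 0)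
        = l.take n ++ (r.drop n).set 0 (l.getD n 0) := by
      rw [List.set_append_right _ _ (by omega), hlen, Nat.sub_self]
    rw [hset, List.drop_eq_getElem_cons (by omega : n < r.length)]
    simp only [List.set_cons_zero]
    rw [List.getD_eq_getElem l 0 (by omega : n < l.length)]
    have htl : l.take (n + 1) = l.take n ++ [l[n]'(by omega)] := by
      rw [List.take_add_one, List.getElem?_eq_getElem (by omega : n < l.length)]
      simp
    rw [htl, List.append_assoc]
    rfl

lemma mnog_fill2 (l : List Int) : ∀ (n : Nat) (r : List Int), n ≤ l.length → n ≤ r.length →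
    (List.range n).foldl (fun r i => r.set i (r.getD i 0 + l.getD i 0)) r
      = List.zipWith (· + ·) (r.take n) (l.take n) ++ r.drop n := by
  intro n
  induction n with
  | zero => intro r _ _; simp
  | succ n ih =>
    intro r hl hr
    rw [List.range_succ, List.foldl_append, ih r (by omega) (by omega)]
    simp only [List.foldl_cons, List.foldl_nil]
    have hrl : (r.take n).length = n := by simp; omega
    have hll : (l.take n).length = n := by simp; omega
    have hzl : (List.zipWith (· + ·) (r.take n) (l.take n)).length = n := by
      simp [hrl, hll]
    set Z := List.zipWith (· + ·) (r.take n) (l.take n) with hZ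
    have hget : (Z ++ r.drop n).getD n 0 = r[n]'(by omega) := by
      rw [List.getD_eq_getElem _ 0 (by simp [hzl]; omega)]
      rw [List.getElem_append_right (by omega)]
      simp [hzl]
    have hset : (Z ++ r.drop n).set n ((Z ++ r.drop n).getD n 0 + l.getD n 0)
        = Z ++ (r[n]'(by omega) + l[n]'(by omega)) :: r.drop (n + 1) := by
      rw [hget, List.set_append_right _ _ (by omega), hzl, Nat.sub_self,
          List.getD_eq_getElem l 0 (by omega : n < l.length),
          List.drop_eq_getElem_cons (by omega : n < r.length), List.set_cons_zero]
    rw [hset]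
    have htr : r.take (n + 1) = r.take n ++ [r[n]'(by omega)] := by
      rw [List.take_add_one, List.getElem?_eq_getElem (by omega : n < r.length)]; simp
    have htl : l.take (n + 1) = l.take n ++ [l[n]'(by omega)] := by
      rw [List.take_add_one, List.getElem?_eq_getElem (by omega : n < l.length)]; simp
    rw [htr, htl, List.zipWith_append (by rw [hrl, hll])]
    simp [hZ]

lemma mnog_altLoop_eq (m1 m2 : List Int) : ∀ (fuel i j : Nat) (acc : List Int), max i j = fuel →
    mnog_altLoop fuel i j m1 m2 acc = acc ++ mnog_rsum m1 m2 i j := by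
  intro fuel
  induction fuel with
  | zero =>
    intro i j acc h
    have hi : i = 0 := by omega
    have hj : j = 0 := by omega
    subst hi; subst hj
    rw [mnog_rsum]
    simp [mnog_altLoop]
  | succ n ih =>
    intro i j acc h
    rw [mnog_altLoop, mnog_rsum]
    rw [if_neg (by omega : ¬ (i = 0 ∧ j = 0)), ih (i - 1) (j - 1) _ (by omega)]
    simp

lemma mnog_rsum_char (m1 m2 : List Int) : ∀ (n i j : Nat), i + j ≤ n → i ≤ m1.length → j ≤ m2.length →
    mnog_rsum m1 m2 i j
      = List.zipWith (· + ·) ((m1.take i).reverse ++ List.replicate (max i j - i) 0)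
          ((m2.take j).reverse ++ List.replicate (max i j - j) 0) := by
  intro n
  induction n with
  | zero =>
    intro i j h _ _
    have hi : i = 0 := by omega
    have hj : j = 0 := by omega
    subst hi; subst hj
    rw [mnog_rsum]; simp
  | succ n ih =>
    intro i j h hi hj
    rw [mnog_rsum]
    by_cases hz : i = 0 ∧ j = 0
    · obtain ⟨hz1, hz2⟩ := hz; subst hz1; subst hz2; simp
    · rw [if_neg hz]
      rw [ih (i - 1) (j - 1) (by omega) (by omega) (by omega)]
      have hmax : max (i - 1) (j - 1) = max i j - 1 := by omega
      rw [hmax]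
      -- heads and tails of the two padded reversed lists
      have hsplit1 : (m1.take i).reverse ++ List.replicate (max i j - i) 0
          = (if 1 ≤ i then m1.getD (i - 1) 0 else 0)
            :: ((m1.take (i - 1)).reverse ++ List.replicate (max i j - 1 - (i - 1)) 0) := by
        by_cases hone : 1 ≤ i
        · rw [if_pos hone]
          obtain ⟨i', rfl⟩ : ∃ i', i = i' + 1 := ⟨i - 1, by omega⟩
          simp only [Nat.add_sub_cancel]
          have ht : m1.take (i' + 1) = m1.take i' ++ [m1[i']'(by omega)] := by
            rw [List.take_add_one, List.getElem?_eq_getElem (by omega : i' < m1.length)]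
            simp
          rw [ht, List.reverse_append,
              List.getD_eq_getElem m1 0 (by omega : i' < m1.length)]
          have hrep : max (i' + 1) j - (i' + 1) = max (i' + 1) j - 1 - i' := by omega
          rw [hrep]
          simp
        · have hi0 : i = 0 := by omega
          subst hi0
          have hj1 : 1 ≤ j := by omega
          rw [if_neg hone]
          simp only [List.take_zero, List.reverse_nil, List.nil_append]
          have h1 : max 0 j - 0 = (max 0 j - 1 - 0) + 1 := by omega
          rw [h1, List.replicate_succ]
          simp
      have hsplit2 : (m2.take j).reverse ++ List.replicate (max i j - j) 0
          = (if 1 ≤ j then m2.getD (j - 1) 0 else 0)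
            :: ((m2.take (j - 1)).reverse ++ List.replicate (max i j - 1 - (j - 1)) 0) := by
        by_cases hone : 1 ≤ j
        · rw [if_pos hone]
          obtain ⟨j', rfl⟩ : ∃ j', j = j' + 1 := ⟨j - 1, by omega⟩
          simp only [Nat.add_sub_cancel]
          have ht : m2.take (j' + 1) = m2.take j' ++ [m2[j']'(by omega)] := by
            rw [List.take_add_one, List.getElem?_eq_getElem (by omega : j' < m2.length)]
            simp
          rw [ht, List.reverse_append,
              List.getD_eq_getElem m2 0 (by omega : j' < m2.length)]
          have hrep : max i (j' + 1) - (j' + 1) = max i (j' + 1) - 1 - j' := by omega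
          rw [hrep]
          simp
        · have hj0 : j = 0 := by omega
          subst hj0
          have hi1 : 1 ≤ i := by omega
          rw [if_neg hone]
          simp only [List.take_zero, List.reverse_nil, List.nil_append]
          have h1 : max i 0 - 0 = (max i 0 - 1 - 0) + 1 := by omega
          rw [h1, List.replicate_succ]
          simp
      rw [hsplit1, hsplit2]
      simp

-- B's summed list equals the zipWith of the two left-padded lists
lemma mnog_summed_eq (m1 m2 : List Int) :
    (mnog_altLoop (max m1.length m2.length) m1.length m2.length m1 m2 []).reverse
      = List.zipWith (· + ·) (mnog_pad (max m1.length m2.length) m1)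
          (mnog_pad (max m1.length m2.length) m2) := by
  rw [mnog_altLoop_eq m1 m2 (max m1.length m2.length) _ _ _ rfl]
  rw [mnog_rsum_char m1 m2 (m1.length + m2.length) _ _ le_rfl le_rfl le_rfl]
  rw [List.nil_append]
  rw [List.reverse_zipWith (by
    simp only [List.length_append, List.length_reverse, List.length_take, List.length_replicate]
    omega)]
  simp only [List.reverse_append, List.reverse_replicate, List.reverse_reverse, List.take_length]
  simp [mnog_pad]

lemma mnog_pad_length (b : Nat) (l : List Int) (h : l.length ≤ b) : (mnog_pad b l).length = b := by
  simp [mnog_pad]; omega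

-- ===== VERDICT (by name: the statement is the Claim_ definition above) =====
theorem mnog_sum_spec : Claim_equal_mnog_sum := by
  intro m1 m2 l1 l2 _ hpre
  unfold Pre_mnog_sum at hpre
  simp only [Spec_mnog_sum, mnog_sum, mnog_sum_alt]
  set b : Nat := max m1.length m2.length with hb
  set R : Int := max l1 l2 with hR
  have hbig : (if (m1.length : Int) > (m2.length : Int) then (m1.length : Int) else (m2.length : Int)) = (b : Int) := by
    rw [hb]; split_ifs <;> push_cast <;> omega
  rw [hbig]
  -- padding loop
  rw [mnog_foldl_const, PySem.List.length_pyRange_one]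
  have htn : ((b : Int) - 0).toNat = b := by omega
  rw [htn]
  have hpad := mnog_iterate_pad b m1 m2 (by omega)
  rw [hpad]
  simp only []
  -- buffer length
  have hbR : b ≤ R.toNat := by omega
  have hp1 : (mnog_pad b m1).length = b := mnog_pad_length b m1 (by omega)
  have hp2 : (mnog_pad b m2).length = b := mnog_pad_length b m2 (by omega)
  rw [hp1, hp2]
  -- fill loops
  rw [mnog_fill1 (mnog_pad b m1) b (List.replicate R.toNat 0) (by omega) (by simp; omega)]
  rw [List.take_of_length_le (by omega), List.drop_replicate]
  rw [mnog_fill2 (mnog_pad b m2) b _ (by omega) (by simp [hp1])]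
  rw [List.take_append_of_le_length (by omega), List.take_of_length_le (by omega)]
  rw [List.take_of_length_le (by omega)]
  rw [List.drop_append_of_le_length (by omega), List.drop_of_length_le (by omega)]
  simp only [List.nil_append]
  -- B's side
  rw [mnog_summed_eq m1 m2]
  have hzlen : (List.zipWith (· + ·) (mnog_pad b m1) (mnog_pad b m2)).length = b := by
    simp [hp1, hp2]
  rw [hzlen]
  rw [mnog_fill1 (List.zipWith (· + ·) (mnog_pad b m1) (mnog_pad b m2)) b
        (List.replicate R.toNat 0) (le_of_eq hzlen.symm)
        (by simp only [List.length_replicate]; omega)]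
  rw [List.take_of_length_le (le_of_eq hzlen), List.drop_replicate]
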